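-- pv_equiv track=rewrite | github.com/adhithyasash1/dsa | week7/Week7.py | IsCodeValid
-- ===== SOURCE A (Python) =====
-- def IsCodeValid(hfcode,message):
-- 	emsg = ''
-- 	huffcode ={}
-- 	maxlength=0
-- 	for i,j in hfcode.items():
-- 		huffcode[j]=i
-- 		if len(j) > maxlength:
-- 			maxlength=len(j)
-- 	cd = ''
-- 	for b in message:
-- 		cd += b
-- 		if len(cd) > maxlength:
-- 			return False
-- 		if cd in huffcode:
-- 			emsg += huffcode[cd]
-- 			cd = ''
-- 	if cd == '':
-- 		return True
-- 	else:
-- 		return False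
-- ===== SOURCE B (Python) =====
-- def IsCodeValid(hfcode, message):
--     codes = set(hfcode.values())
--     prefixes = {c[:k] for c in codes for k in range(1, len(c))}
--     cd = ''
--     for b in message:
--         cd += b
--         if cd in codes:
--             cd = ''
--         elif cd not in prefixes:
--             return False
--     return cd == ''
-- ===== Notes on version B (the rewrite author's own statement) =====
-- stated objective: alternative
-- what changed: Replaces A's inverted dict plus max-code-length bound with precomputed sets of codes and of their proper prefixes: the scan resets on a code and rejects as soon as the accumulated chunk is no longer a prefix of any code, instead of growing it up to the longest code length before failing.
import Mathlib
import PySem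

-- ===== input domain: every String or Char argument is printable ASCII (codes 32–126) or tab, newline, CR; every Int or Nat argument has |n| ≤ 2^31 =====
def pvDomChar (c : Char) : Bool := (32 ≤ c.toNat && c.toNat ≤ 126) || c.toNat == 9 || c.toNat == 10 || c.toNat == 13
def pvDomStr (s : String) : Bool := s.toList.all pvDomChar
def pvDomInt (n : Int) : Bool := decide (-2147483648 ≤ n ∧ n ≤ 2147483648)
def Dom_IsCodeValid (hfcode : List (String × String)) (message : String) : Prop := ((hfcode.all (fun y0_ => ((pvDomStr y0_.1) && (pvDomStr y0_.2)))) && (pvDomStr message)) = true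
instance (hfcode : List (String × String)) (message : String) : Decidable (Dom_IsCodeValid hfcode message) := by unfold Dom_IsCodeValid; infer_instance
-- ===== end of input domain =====

-- B checks the growing chunk against precomputed code/proper-prefix sets instead of A's inverted
-- dict with a max-length bound; same return value everywhere (idiomatic restructuring, no speed claim).

-- ===== PORT A =====
-- A's first loop: builds huffcode (code -> symbol, keyed by the code's characters) and maxlength
def pvA_build : List (String × String) → PySem.Dict (List Char) String × Nat → PySem.Dict (List Char) String × Nat
  | [], acc => acc
  | (i, j) :: rest, (d, m) =>
      pvA_build rest (d.insert j.toList i, if j.toList.length > m then j.toList.length else m)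

-- A's scan loop; emsg is A's (unused-for-the-result) decoded accumulator, carried faithfully
def pvA_loop (huff : PySem.Dict (List Char) String) (maxl : Nat) : List Char → List Char → String → Bool
  | [], cd, _ => cd == []
  | b :: bs, cd, emsg =>
      if (cd ++ [b]).length > maxl then false
      else if huff.contains (cd ++ [b]) then pvA_loop huff maxl bs [] (emsg ++ huff.getD (cd ++ [b]) "")
      else pvA_loop huff maxl bs (cd ++ [b]) emsg

def IsCodeValid (hfcode : List (String × String)) (message : String) : Bool :=
  let hm := pvA_build hfcode (PySem.Dict.empty, 0)
  pvA_loop hm.1 hm.2 message.toList [] ""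

-- ===== PORT B =====
-- {c[:k] for c in codes for k in range(1, len(c))}; c[:k] with 1 ≤ k is exactly c.take k.toNat
def pvB_prefixes (codes : PySem.Set (List Char)) : PySem.Set (List Char) :=
  PySem.Set.ofList (codes.flatMap (fun c => (PySem.List.pyRange 1 (c.length) 1).map (fun k => c.take k.toNat)))

def pvB_loop (codes prefixes : PySem.Set (List Char)) : List Char → List Char → Bool
  | [], cd => cd == []
  | b :: bs, cd =>
      if codes.contains (cd ++ [b]) then pvB_loop codes prefixes bs []
      else if prefixes.contains (cd ++ [b]) then pvB_loop codes prefixes bs (cd ++ [b])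
      else false

def IsCodeValid_alt (hfcode : List (String × String)) (message : String) : Bool :=
  let codes : PySem.Set (List Char) := PySem.Set.ofList (hfcode.map (fun p => p.2.toList))
  pvB_loop codes (pvB_prefixes codes) message.toList []

-- ===== PRECONDITION & SPEC =====
def Spec_IsCodeValid (hfcode : List (String × String)) (message : String) (out : Bool) : Prop := out = IsCodeValid_alt hfcode message
instance (hfcode : List (String × String)) (message : String) (out : Bool) : Decidable (Spec_IsCodeValid hfcode message out) := by unfold Spec_IsCodeValid; infer_instance

-- ===== CLAIM (what is proved, stated in full; the proofs are below) =====
def Claim_equal_IsCodeValid : Prop := ∀ (hfcode : List (String × String)) (message : String), Dom_IsCodeValid hfcode message → Spec_IsCodeValid hfcode message (IsCodeValid hfcode message)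

-- ===== LEMMAS AND PROOFS =====

-- membership in A's inverted dict is membership in the code list
lemma pvA_build_contains (l : List (String × String)) (d : PySem.Dict (List Char) String) (m : Nat) (x : List Char) :
    (pvA_build l (d, m)).1.contains x = (d.contains x || decide (x ∈ l.map (fun p => p.2.toList))) := by
  induction l generalizing d m with
  | nil => simp [pvA_build]
  | cons p rest ih =>
      obtain ⟨i, j⟩ := p
      simp only [pvA_build, ih, PySem.Dict.contains_insert, List.map_cons, List.mem_cons]
      by_cases h : x = j.toList
      · simp [h]
      · have hb : (x == j.toList) = false := by simpa using h
        simp [hb, h]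

-- every code's length is bounded by A's maxlength
lemma pvA_build_maxl (l : List (String × String)) (d : PySem.Dict (List Char) String) (m : Nat) :
    m ≤ (pvA_build l (d, m)).2 ∧ ∀ c ∈ l.map (fun p => p.2.toList), c.length ≤ (pvA_build l (d, m)).2 := by
  induction l generalizing d m with
  | nil => simp [pvA_build]
  | cons p rest ih =>
      obtain ⟨i, j⟩ := p
      simp only [pvA_build, List.map_cons, List.mem_cons]
      obtain ⟨h1, h2⟩ := ih (d.insert j.toList i) (if j.toList.length > m then j.toList.length else m)
      refine ⟨le_trans (by split <;> omega) h1, ?_⟩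
      rintro c (rfl | hc)
      · exact le_trans (by split <;> omega) h1
      · exact h2 c hc

-- a chunk that is no prefix of any code makes A return False whatever follows
lemma pvA_dead (huff : PySem.Dict (List Char) String) (maxl : Nat) (C : List (List Char))
    (hcon : ∀ x, huff.contains x = true ↔ x ∈ C) :
    ∀ (bs cd : List Char) (emsg : String), cd ≠ [] → (∀ c ∈ C, ¬ cd <+: c) →
      pvA_loop huff maxl bs cd emsg = false := by
  intro bs
  induction bs with
  | nil => intro cd emsg hne _; simpa [pvA_loop] using hne
  | cons b bs ih =>
      intro cd emsg hne hdead
      have hnc : ¬ huff.contains (cd ++ [b]) = true := by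
        intro h
        exact hdead _ ((hcon _).mp h) (List.prefix_append _ _)
      rw [pvA_loop, if_neg hnc]
      split
      · rfl
      · exact ih _ emsg (by simp) (fun c hc hp => hdead c hc ((List.prefix_append cd [b]).trans hp))

-- the two scans agree from any common chunk
lemma pv_sync (huff : PySem.Dict (List Char) String) (maxl : Nat)
    (codes prefixes : PySem.Set (List Char)) (C : List (List Char))
    (hcon : ∀ x, huff.contains x = true ↔ x ∈ C)
    (hmax : ∀ c ∈ C, c.length ≤ maxl)
    (hcodes : ∀ x, codes.contains x = true ↔ x ∈ C)
    (hpref : ∀ x : List Char, x ≠ [] → (prefixes.contains x = true ↔ ∃ c ∈ C, x <+: c ∧ x ≠ c)) :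
    ∀ (bs cd : List Char) (emsg : String),
      pvA_loop huff maxl bs cd emsg = pvB_loop codes prefixes bs cd := by
  intro bs
  induction bs with
  | nil => intro cd emsg; rfl
  | cons b bs ih =>
      intro cd emsg
      rw [pvA_loop, pvB_loop]
      by_cases h1 : (cd ++ [b]) ∈ C
      · have hlen : ¬ (cd ++ [b]).length > maxl := by
          have := hmax _ h1; omega
        rw [if_neg hlen, if_pos ((hcon _).mpr h1), if_pos ((hcodes _).mpr h1), ih]
      · have hnc : ¬ huff.contains (cd ++ [b]) = true := fun h => h1 ((hcon _).mp h)
        have hncs : ¬ codes.contains (cd ++ [b]) = true := fun h => h1 ((hcodes _).mp h)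
        rw [if_neg hncs]
        by_cases h2 : ∃ c ∈ C, (cd ++ [b]) <+: c ∧ (cd ++ [b]) ≠ c
        · have hlen : ¬ (cd ++ [b]).length > maxl := by
            obtain ⟨c, hc, hp, _⟩ := h2
            have := hmax c hc
            have := hp.length_le
            omega
          rw [if_neg hlen, if_neg hnc, if_pos ((hpref _ (by simp)).mpr h2), ih]
        · -- dead chunk: B fails now, A fails now or on the remaining suffix
          have hdead : ∀ c ∈ C, ¬ (cd ++ [b]) <+: c := by
            intro c hc hp
            by_cases he : (cd ++ [b]) = c
            · exact h1 (he ▸ hc)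
            · exact h2 ⟨c, hc, hp, he⟩
          have hnp : ¬ prefixes.contains (cd ++ [b]) = true :=
            fun h => h2 ((hpref _ (by simp)).mp h)
          rw [if_neg hnp, if_neg hnc]
          split
          · rfl
          · exact pvA_dead huff maxl C hcon bs _ emsg (by simp) hdead

-- characterization of B's prefix set: the proper nonempty prefixes of the codes
lemma pvB_prefixes_contains (C : List (List Char)) (x : List Char) (hx : x ≠ []) :
    (pvB_prefixes (PySem.Set.ofList C)).contains x = true ↔ ∃ c ∈ C, x <+: c ∧ x ≠ c := by
  unfold pvB_prefixes
  rw [PySem.Set.contains_iff, PySem.Set.mem_ofList]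
  simp only [List.mem_flatMap, List.mem_map, PySem.Set.mem_ofList, PySem.List.mem_pyRange_one]
  constructor
  · rintro ⟨c, hc, k, ⟨hk1, hk2⟩, rfl⟩
    refine ⟨c, hc, List.take_prefix _ _, ?_⟩
    intro he
    have : (c.take k.toNat).length = k.toNat := by
      rw [List.length_take]
      omega
    rw [he] at this
    omega
  · rintro ⟨c, hc, hp, hne⟩
    refine ⟨c, hc, (x.length : Int), ⟨?_, ?_⟩, ?_⟩
    · have : x.length ≠ 0 := fun h => hx (List.eq_nil_of_length_eq_zero h)
      omega
    · have hlt : x.length < c.length := by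
        rcases lt_or_eq_of_le hp.length_le with h | h
        · exact h
        · exact absurd (hp.eq_of_length h) hne
      exact_mod_cast hlt
    · rw [Int.toNat_natCast]
      exact (List.prefix_iff_eq_take.mp hp).symm

-- ===== VERDICT (by name: the statement is the Claim_ definition above) =====
theorem IsCodeValid_spec : Claim_equal_IsCodeValid := by
  intro hfcode message _
  unfold Spec_IsCodeValid IsCodeValid IsCodeValid_alt
  apply pv_sync _ _ _ _ (hfcode.map (fun p => p.2.toList))
  · intro x
    rw [pvA_build_contains]
    simp
  · exact (pvA_build_maxl hfcode PySem.Dict.empty 0).2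
  · intro x
    rw [PySem.Set.contains_iff, PySem.Set.mem_ofList]
  · exact pvB_prefixes_contains _
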